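-- pv_equiv track=rewrite | github.com/QuHarmonics/Nexus-4-Framework-Recursive-Harmonic-Architecture | Python Code - Raw Dump/Nexus 4 Framework -Hasing_3-checkpoint-code_5- Qu Harmonics.py | compress_large_input
-- ===== SOURCE A (Python) =====
-- from math import ceil, log2
--
-- def is_power_of_two(n):
--     """
--     Checks if 'n' is a power of two.
--     """
--     return (n & (n - 1) == 0) and (n != 0)
--
-- def zero_pad_to_block(seed, block_size):
--     """
--     Convert 'seed' to binary, then pad with zeros until 'len(seed_binary)'
--     is a multiple of 'block_size'.
--     """
--     seed_binary = "".join(f"{ord(c):08b}" for c in seed)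
--     while len(seed_binary) % block_size != 0:
--         seed_binary += "0"
--     return [int(bit) for bit in seed_binary]
--
-- def determine_container_size(data_length):
--     """
--     Determine the smallest power-of-two container size that can hold 'data_length' bits.
--     """
--     base = int(ceil(log2(data_length)))
--     container_size = 2 ** base
--     return base, container_size
--
-- def binary_to_base(data, base):
--     """
--     Interpret the entire 'data' list of bits as one integer, then convert
--     that integer into an array of digits in 'base'.
--     """
--     value = int("".join(str(bit) for bit in data), 2)
--     if value == 0:
--         return [0]
--     result = []
--     while value > 0:
--         result.append(value % base)
--         value //= base
--     return result[::-1]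
--
-- def base_to_binary(data, base, total_bits=None):
--     """
--     Convert an array of digits in 'base' back to a list of bits.
--     If 'total_bits' is specified, zero-pad the front so the output
--     always has 'total_bits' bits.
--     """
--     value = 0
--     for digit in data:
--         value = value * base + digit
--
--     binary_str = bin(value)[2:]  # remove '0b' prefix
--
--     if total_bits is not None:
--         # Pad at the front to keep alignment
--         binary_str = binary_str.zfill(total_bits)
--
--     return [int(bit) for bit in binary_str]
--
-- def binary_to_hex(binary_data):
--     """
--     Convert a list of bits to a hexadecimal string.
--     """
--     if not binary_data:
--         return ""
--     binary_string = "".join(str(bit) for bit in binary_data)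
--     hex_string = hex(int(binary_string, 2))[2:].upper()
--     return hex_string
--
-- def compress_large_input(seed, initial_base=16, final_base=32):
--     """
--     Convert 'seed' to a 512-bit (or nearest block) container, then iteratively
--     re-encode only through power-of-two bases from 'initial_base' to 'final_base'.
--     """
--     padded_data = zero_pad_to_block(seed, block_size=512)
--     data_length = len(padded_data)
--
--     _, container_size = determine_container_size(data_length)
--     container = [0] * container_size
--     container[:len(padded_data)] = padded_data[:container_size]
--
--     current_data = container
--     for b in range(initial_base, final_base + 1):
--         if not is_power_of_two(b):
--             continue
--         converted_base = binary_to_base(current_data, b)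
--         current_data = base_to_binary(converted_base, b, total_bits=container_size)
--
--         new_container = [0] * container_size
--         length_to_copy = min(len(current_data), container_size)
--         new_container[:length_to_copy] = current_data[:length_to_copy]
--         current_data = new_container
--
--     final_hex = binary_to_hex(current_data)
--     return current_data, final_hex
-- ===== SOURCE B (Python) =====
-- def compress_large_input(seed, initial_base=16, final_base=32):
--     """
--     The base-re-encoding loop in A is a pure identity: every power-of-two base
--     round-trips the container's integer value and zero-fills back to
--     container_size bits.  So build the padded container once and hex it.
--     """
--     bits = [int(b) for c in seed for b in format(ord(c), "08b")]
--     bits += [0] * (-len(bits) % 512)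
--     size = 1 << (len(bits) - 1).bit_length()
--     container = bits + [0] * (size - len(bits))
--     hex_string = format(int("".join(map(str, container)), 2), "X")
--     return container, hex_string
-- ===== Notes on version B (the rewrite author's own statement) =====
-- stated objective: simpler
-- what changed: B drops A's whole re-encoding loop over bases (each power-of-two base conversion round-trips the container's integer value and zero-fills back to container_size bits, so every iteration is an identity) and just builds the 512-block-padded power-of-two container once and formats its value as hex.
import Mathlib
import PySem

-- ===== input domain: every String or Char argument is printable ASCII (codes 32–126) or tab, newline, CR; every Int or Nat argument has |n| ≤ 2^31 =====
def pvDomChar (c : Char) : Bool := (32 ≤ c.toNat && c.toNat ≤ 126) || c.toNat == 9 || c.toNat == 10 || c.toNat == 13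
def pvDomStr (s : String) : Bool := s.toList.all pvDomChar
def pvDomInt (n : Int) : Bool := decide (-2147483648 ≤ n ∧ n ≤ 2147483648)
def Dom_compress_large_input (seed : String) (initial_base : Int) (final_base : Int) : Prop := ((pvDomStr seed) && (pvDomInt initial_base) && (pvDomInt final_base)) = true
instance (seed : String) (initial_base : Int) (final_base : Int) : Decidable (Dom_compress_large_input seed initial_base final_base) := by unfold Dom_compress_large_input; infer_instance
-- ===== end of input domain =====

-- B replaces A's loop over bases (each power-of-two re-encoding is a proven identity on the
-- container) by building the padded power-of-two container once and hexing it directly.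

-- ===== PORT A =====

-- bin(n)[2:] for n > 0, as a list of 0/1 ints (MSB first); [] for n = 0
def pvNatBits (n : Nat) : List Int :=
  if n = 0 then [] else pvNatBits (n / 2) ++ [((n % 2 : Nat) : Int)]

-- f"{ord(c):08b}" as a list of bit ints (zero-filled to 8; exact for code points < 256, i.e. all of Dom)
def pvByteBits (n : Nat) : List Int :=
  List.replicate (8 - (pvNatBits n).length) 0 ++ pvNatBits n

-- the 'while len % 512 != 0: seed_binary += "0"' loop of zero_pad_to_block (block_size = 512)
def pvPadLoop (bits : List Int) : List Int :=
  if bits.length % 512 ≠ 0 then pvPadLoop (bits ++ [0]) else bits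
  termination_by (512 - bits.length % 512) % 512
  decreasing_by simp only [List.length_append, List.length_cons, List.length_nil]; omega

def zero_pad_to_block (seed : String) : List Int :=
  pvPadLoop (seed.toList.flatMap (fun c => pvByteBits c.toNat))

-- int("".join(str(bit) for bit in data), 2); exact because every element is 0 or 1 at every call
def pvValBits (data : List Int) : Int := data.foldl (fun a b => 2 * a + b) 0

-- the 'while value > 0' digit loop of binary_to_base, LSB first; the '1 < b' guard only makes the
-- recursion total — Python never terminates on base 1 with value > 0 (excluded by Pre_), and
-- bases < 2 never reach this loop in A (they fail is_power_of_two)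
def pvToBaseLoop (v b : Int) : List Int :=
  if h : 0 < v ∧ 1 < b then PySem.Int.mod v b :: pvToBaseLoop (PySem.Int.floordiv v b) b else []
  termination_by v.toNat
  decreasing_by
    rw [PySem.Int.floordiv_eq_ediv_of_pos (by omega)]
    rw [Int.toNat_lt_toNat (by omega)]
    rw [Int.ediv_lt_iff_lt_mul (by omega)]
    nlinarith

def binary_to_base (data : List Int) (base : Int) : List Int :=
  let value := pvValBits data
  if value = 0 then [0] else (pvToBaseLoop value base).reverse

-- the 'for digit in data: value = value * base + digit' loop of base_to_binary
def pvFromBase (digits : List Int) (b : Int) : Int := digits.foldl (fun a d => a * b + d) 0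

-- bin(value)[2:] then zfill(total_bits); value ≥ 0 at every call (digits come from binary_to_base)
def base_to_binary (digits : List Int) (base : Int) (total_bits : Nat) : List Int :=
  let value := pvFromBase digits base
  let bs := if value.toNat = 0 then [(0 : Int)] else pvNatBits value.toNat
  List.replicate (total_bits - bs.length) 0 ++ bs

def pvHexDigit (n : Nat) : Char := if n < 10 then Char.ofNat (48 + n) else Char.ofNat (55 + n)

-- hex(n)[2:].upper() for n > 0 (MSB first); [] for n = 0
def pvHexLoop (n : Nat) : List Char :=
  if n = 0 then [] else pvHexLoop (n / 16) ++ [pvHexDigit (n % 16)]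

def binary_to_hex (binary_data : List Int) : String :=
  if binary_data = [] then ""
  else
    let v := (pvValBits binary_data).toNat
    String.mk (if v = 0 then ['0'] else pvHexLoop v)

-- (n & (n - 1) == 0) and (n != 0)
def is_power_of_two (n : Int) : Bool := (PySem.Int.band n (n - 1) == 0) && (n != 0)

def compress_large_input (seed : String) (initial_base : Int) (final_base : Int) : List Int × String :=
  let padded_data := zero_pad_to_block seed
  let data_length := padded_data.length
  -- determine_container_size: 2 ** int(ceil(log2(L))); Nat.clog 2 is exact for L ≥ 1 in Dom
  let container_size := 2 ^ Nat.clog 2 data_length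
  -- container[:len(padded_data)] = padded_data[:container_size]
  let container := padded_data.take container_size ++ (List.replicate container_size (0 : Int)).drop data_length
  let final :=
    (PySem.List.pyRange initial_base (final_base + 1) 1).foldl
      (fun current_data b =>
        if is_power_of_two b then
          let converted_base := binary_to_base current_data b
          let nd := base_to_binary converted_base b container_size
          let length_to_copy := min nd.length container_size
          nd.take length_to_copy ++ (List.replicate container_size (0 : Int)).drop length_to_copy
        else current_data)
      container
  (final, binary_to_hex final)

-- ===== PORT B =====

def compress_large_input_alt (seed : String) (initial_base : Int) (final_base : Int) : List Int × String :=
  let bits := seed.toList.flatMap (fun c => pvByteBits c.toNat)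
  -- bits += [0] * (-len(bits) % 512)
  let padded := bits ++ List.replicate (PySem.Int.mod (-(bits.length : Int)) 512).toNat 0
  -- size = 1 << (len(bits) - 1).bit_length()
  let size := 1 <<< PySem.Int.bitLength ((padded.length : Int) - 1)
  let container := padded ++ List.replicate (size - padded.length) 0
  -- int("".join(map(str, container)), 2); exact because every container entry is 0 or 1
  let value := container.foldl (fun a b => 2 * a + b) 0
  -- format(value, "X")
  (container, String.mk (if value.toNat = 0 then ['0'] else pvHexLoop value.toNat))

-- ===== PRECONDITION & SPEC =====

-- Pre_ excludes the empty seed, on which A raises ValueError from log2 of zero, and base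
-- ranges containing 1, on which A's base-1 digit loop never terminates.
def Pre_compress_large_input (seed : String) (initial_base : Int) (final_base : Int) : Prop :=
  seed ≠ "" ∧ ¬(initial_base ≤ 1 ∧ 1 ≤ final_base)
instance (seed : String) (initial_base : Int) (final_base : Int) : Decidable (Pre_compress_large_input seed initial_base final_base) := by unfold Pre_compress_large_input; infer_instance

def pvWitness_compress_large_input : String × Int × Int := ("A", 16, 32)

def Spec_compress_large_input (seed : String) (initial_base : Int) (final_base : Int) (out : List Int × String) : Prop := out = compress_large_input_alt seed initial_base final_base
instance (seed : String) (initial_base : Int) (final_base : Int) (out : List Int × String) : Decidable (Spec_compress_large_input seed initial_base final_base out) := by unfold Spec_compress_large_input; infer_instance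

-- ===== CLAIM (what is proved, stated in full; the proofs are below) =====
def Claim_equal_compress_large_input : Prop := ∀ (seed : String) (initial_base : Int) (final_base : Int), Dom_compress_large_input seed initial_base final_base → Pre_compress_large_input seed initial_base final_base → Spec_compress_large_input seed initial_base final_base (compress_large_input seed initial_base final_base)

-- ===== LEMMAS AND PROOFS =====

-- all elements are bits
def pvBinary (xs : List Int) : Prop := ∀ x ∈ xs, x = 0 ∨ x = 1

theorem pv_foldl_shift (xs : List Int) (a : Int) :
    xs.foldl (fun a b => 2 * a + b) a = a * 2 ^ xs.length + xs.foldl (fun a b => 2 * a + b) 0 := by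
  induction xs generalizing a with
  | nil => simp
  | cons x xs ih =>
    simp only [List.foldl_cons, List.length_cons]
    rw [ih (2 * a + x), ih (2 * 0 + x)]
    ring

theorem pv_valBits_bounds (xs : List Int) (h : pvBinary xs) :
    0 ≤ pvValBits xs ∧ pvValBits xs < 2 ^ xs.length := by
  induction xs with
  | nil => simp [pvValBits]
  | cons x xs ih =>
    have hx := h x (by simp)
    have hxs := ih (fun y hy => h y (by simp [hy]))
    have hp : (0:Int) < 2 ^ xs.length := by positivity
    simp only [pvValBits, List.foldl_cons, List.length_cons] at *
    rw [show (2 * 0 + x) = x by ring, pv_foldl_shift xs x, pow_succ]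
    rcases hx with hx | hx <;> subst hx <;> constructor <;> nlinarith [hxs.1, hxs.2]

theorem pv_valBits_append (xs ys : List Int) :
    pvValBits (xs ++ ys) = pvValBits xs * 2 ^ ys.length + pvValBits ys := by
  simp only [pvValBits, List.foldl_append]
  rw [pv_foldl_shift ys (List.foldl (fun a b => 2 * a + b) 0 xs)]

theorem pv_valBits_replicate_zero (k : Nat) : pvValBits (List.replicate k 0) = 0 := by
  induction k with
  | zero => simp [pvValBits]
  | succ n ih => rw [List.replicate_succ]; simpa [pvValBits] using ih

theorem pv_valBits_pad (k : Nat) (bs : List Int) :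
    pvValBits (List.replicate k 0 ++ bs) = pvValBits bs := by
  rw [pv_valBits_append, pv_valBits_replicate_zero]; ring

theorem pv_eq_of_valBits_eq (xs : List Int) : ∀ ys : List Int, pvBinary xs → pvBinary ys →
    xs.length = ys.length → pvValBits xs = pvValBits ys → xs = ys := by
  induction xs with
  | nil => intro ys _ _ hlen _; simpa using (List.length_eq_zero_iff.mp hlen.symm).symm
  | cons x xs ih =>
    intro ys hx hy hlen hval
    cases ys with
    | nil => simp at hlen
    | cons y ys =>
      simp only [List.length_cons, Nat.add_right_cancel_iff] at hlen
      have hbx := pv_valBits_bounds xs (fun z hz => hx z (by simp [hz]))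
      have hby := pv_valBits_bounds ys (fun z hz => hy z (by simp [hz]))
      simp only [pvValBits, List.foldl_cons] at hval
      rw [show (2 * 0 + x) = x by ring, show (2 * 0 + y) = y by ring,
        pv_foldl_shift xs x, pv_foldl_shift ys y, hlen] at hval
      have hp : (0:Int) < 2 ^ ys.length := by positivity
      rw [hlen] at hbx
      simp only [pvValBits] at hbx hby
      have hxy : x = y := by
        rcases hx x (by simp) with h1 | h1 <;> rcases hy y (by simp) with h2 | h2 <;>
          subst h1 <;> subst h2 <;> first | rfl | nlinarith [hbx.1, hbx.2, hby.1, hby.2]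
      subst hxy
      have hv : pvValBits xs = pvValBits ys := by
        simp only [pvValBits]; linarith [hval]
      rw [ih ys (fun z hz => hx z (by simp [hz])) (fun z hz => hy z (by simp [hz])) hlen hv]

theorem pv_natBits_binary (m : Nat) : pvBinary (pvNatBits m) := by
  induction m using Nat.strong_induction_on with
  | _ m ih =>
    rw [pvNatBits]
    split
    · intro x hx; simp at hx
    · intro x hx
      rcases List.mem_append.mp hx with h | h
      · exact ih (m / 2) (by omega) x h
      · simp at h; omega

theorem pv_valBits_natBits (m : Nat) : pvValBits (pvNatBits m) = (m : Int) := by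
  induction m using Nat.strong_induction_on with
  | _ m ih =>
    rw [pvNatBits]
    split
    · simp [pvValBits]; omega
    · rw [pv_valBits_append, ih (m / 2) (by omega)]
      simp [pvValBits]
      push_cast
      omega

theorem pv_natBits_len_le (m k : Nat) (h : m < 2 ^ k) : (pvNatBits m).length ≤ k := by
  induction m using Nat.strong_induction_on generalizing k with
  | _ m ih =>
    rw [pvNatBits]
    split
    · simp
    · rename_i hm
      have hk : 1 ≤ k := by
        by_contra hk
        interval_cases k <;> omega
      have hdiv : m / 2 < 2 ^ (k - 1) := by
        have : 2 ^ k = 2 * 2 ^ (k - 1) := by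
          rw [← pow_succ']; congr 1; omega
        omega
      have := ih (m / 2) (by omega) (k - 1) hdiv
      simp only [List.length_append, List.length_cons, List.length_nil]
      omega

theorem pv_fromBase_roundtrip (v b : Int) (hb : 1 < b) (hv : 0 ≤ v) :
    pvFromBase ((pvToBaseLoop v b).reverse) b = v := by
  revert hv
  refine pvToBaseLoop.induct b
    (motive := fun v => 0 ≤ v → pvFromBase ((pvToBaseLoop v b).reverse) b = v)
    (fun v hcond ih hv => ?_) (fun v hcond hv => ?_) v
  · rw [pvToBaseLoop, dif_pos hcond]
    simp only [List.reverse_cons]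
    unfold pvFromBase
    rw [List.foldl_append]
    have hdivnn : 0 ≤ PySem.Int.floordiv v b := by
      rw [PySem.Int.floordiv_eq_ediv_of_pos (by omega)]
      exact Int.ediv_nonneg (by omega) (by omega)
    have hrec := ih hdivnn
    unfold pvFromBase at hrec
    rw [hrec]
    simp only [List.foldl_cons, List.foldl_nil]
    rw [PySem.Int.floordiv_eq_ediv_of_pos (by omega), PySem.Int.mod_eq_emod_of_pos (by omega)]
    rw [Int.mul_comm]
    exact Int.ediv_add_emod v b
  · rw [pvToBaseLoop, dif_neg hcond]
    have hz : v = 0 := by omega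
    simp [hz, pvFromBase]

theorem pv_padLoop_eq (bs : List Int) :
    pvPadLoop bs = bs ++ List.replicate ((512 - bs.length % 512) % 512) 0 := by
  induction bs using pvPadLoop.induct with
  | case1 bs h ih =>
    rw [pvPadLoop, if_pos h, ih]
    rw [List.append_assoc]
    congr 1
    have h1 : (512 - (bs ++ [0]).length % 512) % 512 + 1 = (512 - bs.length % 512) % 512 := by
      simp only [List.length_append, List.length_cons, List.length_nil]
      omega
    simp only [List.singleton_append, ← h1, List.replicate_succ]
  | case2 bs h =>
    rw [pvPadLoop, if_neg h]
    have : bs.length % 512 = 0 := by omega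
    simp [this]

theorem pv_mod_neg_512 (n : Nat) :
    (PySem.Int.mod (-(n : Int)) 512).toNat = (512 - n % 512) % 512 := by
  rw [PySem.Int.mod_eq_emod_of_pos (by norm_num)]
  omega

theorem pv_size_eq (L : Nat) (h : 1 ≤ L) :
    2 ^ Nat.clog 2 L = 1 <<< PySem.Int.bitLength ((L : Int) - 1) := by
  rw [Nat.one_shiftLeft]
  congr 1
  rcases Nat.eq_or_lt_of_le h with h1 | h1
  · rw [← h1]
    simp [Nat.clog_one_right, PySem.Int.bitLength_zero]
  · have hne : ((L : Int) - 1) ≠ 0 := by omega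
    have habs : ((L : Int) - 1).natAbs = L - 1 := by omega
    have hlt := PySem.Int.lt_two_pow_bitLength ((L : Int) - 1)
    have hle := PySem.Int.two_pow_bitLength_le ((L : Int) - 1) hne
    rw [habs] at hlt hle
    apply le_antisymm
    · rw [Nat.clog_le_iff_le_pow (by norm_num)]
      omega
    · have h2 : 2 ^ (PySem.Int.bitLength ((L : Int) - 1) - 1) < 2 ^ Nat.clog 2 L := by
        calc 2 ^ (PySem.Int.bitLength ((L : Int) - 1) - 1) ≤ L - 1 := hle
          _ < L := by omega
          _ ≤ 2 ^ Nat.clog 2 L := Nat.le_pow_clog (by norm_num) L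
      have := (Nat.pow_lt_pow_iff_right (by norm_num : 1 < 2)).mp h2
      omega

theorem pv_band_neg (b : Int) (h : b < 0) : PySem.Int.band b (b - 1) ≠ 0 := by
  simp only [PySem.Int.band]
  split_ifs <;> omega

theorem pv_foldl_fixed {α β : Type} (f : α → β → α) (l : List β) (c : α)
    (h : ∀ b ∈ l, f c b = c) : l.foldl f c = c := by
  induction l with
  | nil => rfl
  | cons x xs ih => rw [List.foldl_cons, h x (by simp)]; exact ih (fun b hb => h b (by simp [hb]))

theorem pv_zfill_id (sz : Nat) (c bs : List Int) (hlen : c.length = sz)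
    (hbin : pvBinary c) (hbsbin : pvBinary bs) (hbslen : bs.length ≤ sz)
    (hval : pvValBits bs = pvValBits c) :
    (List.replicate (sz - bs.length) (0 : Int) ++ bs).take
        (min (List.replicate (sz - bs.length) (0 : Int) ++ bs).length sz)
      ++ (List.replicate sz (0 : Int)).drop
        (min (List.replicate (sz - bs.length) (0 : Int) ++ bs).length sz) = c := by
  have hndlen : (List.replicate (sz - bs.length) (0 : Int) ++ bs).length = sz := by
    rw [List.length_append, List.length_replicate]
    omega
  rw [hndlen, Nat.min_self, List.take_of_length_le (le_of_eq hndlen),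
    List.drop_replicate, Nat.sub_self, List.replicate_zero, List.append_nil]
  apply pv_eq_of_valBits_eq _ c _ hbin _ _
  · intro x hx
    rcases List.mem_append.mp hx with h | h
    · left; exact List.eq_of_mem_replicate h
    · exact hbsbin x h
  · rw [hndlen, hlen]
  · rw [pv_valBits_pad]
    exact hval

theorem pv_step_id (sz : Nat) (c : List Int) (b : Int) (hsz : 0 < sz)
    (hlen : c.length = sz) (hbin : pvBinary c) (hb : 2 ≤ b) :
    (base_to_binary (binary_to_base c b) b sz).take
        (min (base_to_binary (binary_to_base c b) b sz).length sz)
      ++ (List.replicate sz (0 : Int)).drop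
        (min (base_to_binary (binary_to_base c b) b sz).length sz) = c := by
  obtain ⟨hv0, hvlt⟩ := pv_valBits_bounds c hbin
  rw [hlen] at hvlt
  have hw : pvFromBase (binary_to_base c b) b = pvValBits c := by
    unfold binary_to_base
    by_cases hz : pvValBits c = 0
    · simp [hz, pvFromBase]
    · rw [if_neg hz]
      exact pv_fromBase_roundtrip (pvValBits c) b (by omega) hv0
  unfold base_to_binary
  rw [hw]
  dsimp only
  by_cases hz : (pvValBits c).toNat = 0
  · rw [if_pos hz]
    apply pv_zfill_id sz c [(0 : Int)] hlen hbin
    · intro x hx; simp at hx; left; exact hx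
    · simpa using hsz
    · have h01 : pvValBits [(0 : Int)] = 0 := by simp [pvValBits]
      rw [h01]
      omega
  · rw [if_neg hz]
    have hvnat : (pvValBits c).toNat < 2 ^ sz := by
      have hcast : ((2 ^ sz : Nat) : Int) = (2 : Int) ^ sz := by push_cast; ring
      omega
    apply pv_zfill_id sz c (pvNatBits (pvValBits c).toNat) hlen hbin
    · exact pv_natBits_binary _
    · exact pv_natBits_len_le _ sz hvnat
    · rw [pv_valBits_natBits]
      omega

theorem pv_byteBits_binary (n : Nat) : pvBinary (pvByteBits n) := by
  intro x hx
  rcases List.mem_append.mp hx with h | h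
  · left; exact List.eq_of_mem_replicate h
  · exact pv_natBits_binary n x h

theorem pv_byteBits_ne (n : Nat) : pvByteBits n ≠ [] := by
  intro h
  have := congrArg List.length h
  simp only [pvByteBits, List.length_append, List.length_replicate, List.length_nil] at this
  omega

theorem pv_flatMap_ne (cs : List Char) (h : cs ≠ []) :
    cs.flatMap (fun c => pvByteBits c.toNat) ≠ [] := by
  cases cs with
  | nil => exact absurd rfl h
  | cons c cs =>
    simp only [List.flatMap_cons, ne_eq, List.append_eq_nil_iff, not_and]
    intro hc
    exact absurd hc (pv_byteBits_ne c.toNat)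

theorem pv_flatMap_binary (cs : List Char) :
    pvBinary (cs.flatMap (fun c => pvByteBits c.toNat)) := by
  intro x hx
  obtain ⟨c, _, hx⟩ := List.mem_flatMap.mp hx
  exact pv_byteBits_binary c.toNat x hx

theorem pv_replicate_binary (k : Nat) : pvBinary (List.replicate k (0 : Int)) := by
  intro x hx; left; exact List.eq_of_mem_replicate hx

theorem pv_append_binary {xs ys : List Int} (hx : pvBinary xs) (hy : pvBinary ys) :
    pvBinary (xs ++ ys) := by
  intro x h
  rcases List.mem_append.mp h with h | h
  · exact hx x h
  · exact hy x h

-- ===== VERDICT (by name: the statement is the Claim_ definition above) =====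
theorem compress_large_input_spec : Claim_equal_compress_large_input := by
  intro seed ib fb hdom hpre
  obtain ⟨hseed, hone⟩ := hpre
  unfold Spec_compress_large_input
  have hcs : seed.toList ≠ [] := by
    intro h
    exact hseed (by rwa [← String.toList_eq_nil_iff])
  set bits := seed.toList.flatMap (fun c => pvByteBits c.toNat) with hbitsdef
  set k := (512 - bits.length % 512) % 512 with hkdef
  set P := bits ++ List.replicate k 0 with hPdef
  set L := P.length with hLdef
  set sz := 2 ^ Nat.clog 2 L with hszdef
  have hbits_ne : bits ≠ [] := pv_flatMap_ne seed.toList hcs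
  have hL1 : 1 ≤ L := by
    rw [hLdef, hPdef, List.length_append]
    have := List.length_pos_iff.mpr hbits_ne
    omega
  have hLle : L ≤ sz := Nat.le_pow_clog (by norm_num) L
  have hszpos : 0 < sz := by positivity
  set c := P ++ List.replicate (sz - L) 0 with hcdef
  have hclen : c.length = sz := by
    rw [hcdef, List.length_append, List.length_replicate, ← hLdef]
    omega
  have hcbin : pvBinary c :=
    pv_append_binary (pv_append_binary (pv_flatMap_binary _) (pv_replicate_binary _))
      (pv_replicate_binary _)
  have hcne : c ≠ [] := by
    intro h
    rw [h] at hclen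
    simp at hclen
    omega
  have hpad : zero_pad_to_block seed = P := by
    rw [zero_pad_to_block, pv_padLoop_eq]
  have hA : compress_large_input seed ib fb = (c, binary_to_hex c) := by
    unfold compress_large_input
    rw [hpad]
    dsimp only
    rw [← hLdef, ← hszdef, List.take_of_length_le hLle, List.drop_replicate, ← hcdef]
    rw [pv_foldl_fixed _ _ _ ?hstep]
    case hstep =>
    intro b hbmem
    rw [PySem.List.mem_pyRange_one] at hbmem
    by_cases hp2 : is_power_of_two b = true
    · rw [if_pos hp2]
      simp only [is_power_of_two, Bool.and_eq_true, beq_iff_eq, bne_iff_ne] at hp2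
      obtain ⟨hband, hbne⟩ := hp2
      have hbpos : 0 < b := by
        rcases lt_trichotomy b 0 with h | h | h
        · exact absurd hband (pv_band_neg b h)
        · exact absurd h hbne
        · exact h
      have hb1 : b ≠ 1 := by
        intro h
        exact hone ⟨by omega, by omega⟩
      exact pv_step_id sz c b hszpos hclen hcbin (by omega)
    · rw [if_neg hp2]
  have hB : compress_large_input_alt seed ib fb = (c, binary_to_hex c) := by
    unfold compress_large_input_alt
    dsimp only
    rw [pv_mod_neg_512, ← hkdef, ← hbitsdef, ← hPdef, ← hLdef,
      ← pv_size_eq L hL1, ← hszdef, ← hcdef]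
    congr 1
    rw [binary_to_hex, if_neg hcne]
    rfl
  rw [hA, hB]
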